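-- pv_equiv track=rewrite | github.com/cindy-kivala/week1-python-sdft14 | palindrome.py | choose_palindromes
-- ===== SOURCE A (Python) =====
-- def choose_palindromes(words):
--      #return [p for p in words if p.lower() == p.lower()[::-1]]
--      palindromes = [] #our list of palindromes
--      # Iterate through each word in the list
--
--      #1. lowercase the word
--      for p in words:
--          cleaned_word = p.lower()
--      #2. Spaces
--          cleaned_word = ''.join(filter(str.isalnum, cleaned_word))
--      #3. Check if the cleaned word is a palindrome
--          if cleaned_word == cleaned_word[::-1] and cleaned_word != '':
--              palindromes.append(p)
--
--      return palindromes
-- ===== SOURCE B (Python) =====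
-- def _accepts(p):
--     cleaned = [c for c in p.lower() if c.isalnum()]
--     if not cleaned:
--         return False
--     i, j = 0, len(cleaned) - 1
--     while i < j:
--         if cleaned[i] != cleaned[j]:
--             return False
--         i += 1
--         j -= 1
--     return True
--
--
-- def choose_palindromes(words):
--     return [p for p in words if _accepts(p)]
-- ===== Notes on version B (the rewrite author's own statement) =====
-- stated objective: alternative
-- what changed: Replaces the accumulator loop with reverse-and-compare (which builds a reversed copy of each cleaned word) by a list-comprehension filter whose palindrome test is an explicit two-pointer scan that stops at the first mismatching pair and allocates no reversed copy.
import Mathlib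
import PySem

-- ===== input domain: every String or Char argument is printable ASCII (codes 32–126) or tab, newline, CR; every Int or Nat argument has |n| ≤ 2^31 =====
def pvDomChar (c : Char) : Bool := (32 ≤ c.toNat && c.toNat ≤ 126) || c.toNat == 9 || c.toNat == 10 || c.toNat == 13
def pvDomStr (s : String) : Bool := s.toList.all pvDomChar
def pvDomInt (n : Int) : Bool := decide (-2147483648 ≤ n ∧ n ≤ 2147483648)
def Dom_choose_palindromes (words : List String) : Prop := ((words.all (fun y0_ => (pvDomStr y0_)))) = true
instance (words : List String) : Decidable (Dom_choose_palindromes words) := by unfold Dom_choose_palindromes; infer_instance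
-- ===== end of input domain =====

-- B replaces A's accumulator loop with reverse-and-compare by a filter whose palindrome
-- test is an explicit two-pointer scan; equal output on every input (both are total).

-- ===== PORT A =====
def choose_palindromes (words : List String) : List String :=
  words.foldl (fun palindromes p =>
    let cleaned : List Char := (PySem.Chars.lower p.toList).filter PySem.Chars.isalnum
    if cleaned = (PySem.List.slice? cleaned none none (-1)).getD [] ∧ cleaned ≠ [] then
      palindromes ++ [p]
    else palindromes) []

-- ===== PORT B =====
-- two-pointer while loop of Source B: i, j move inward until they meet or a pair mismatches
def pvPalLoop (cs : List Char) (i j : Nat) : Bool :=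
  if i < j then
    if cs.getD i ' ' ≠ cs.getD j ' ' then false
    else pvPalLoop cs (i + 1) (j - 1)
  else true
termination_by j - i

def pvAccepts (p : String) : Bool :=
  let cleaned : List Char := (PySem.Chars.lower p.toList).filter PySem.Chars.isalnum
  if cleaned.isEmpty then false
  else pvPalLoop cleaned 0 (cleaned.length - 1)

def choose_palindromes_alt (words : List String) : List String :=
  words.filter pvAccepts

-- ===== PRECONDITION & SPEC =====
def Spec_choose_palindromes (words : List String) (out : List String) : Prop := out = choose_palindromes_alt words
instance (words : List String) (out : List String) : Decidable (Spec_choose_palindromes words out) := by unfold Spec_choose_palindromes; infer_instance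

-- ===== CLAIM (what is proved, stated in full; the proofs are below) =====
def Claim_equal_choose_palindromes : Prop := ∀ (words : List String), Dom_choose_palindromes words → Spec_choose_palindromes words (choose_palindromes words)

-- ===== LEMMAS AND PROOFS =====

-- the two-pointer loop checks exactly the mirror pairs between i and j (with i + j fixed)
lemma pvPalLoop_true_iff (cs : List Char) (i j : Nat) :
    pvPalLoop cs i j = true ↔ ∀ k, i ≤ k → k ≤ j → cs.getD k ' ' = cs.getD (i + j - k) ' ' := by
  induction i, j using pvPalLoop.induct cs with
  | case1 i j hij hne =>
      rw [pvPalLoop, if_pos hij, if_pos hne]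
      constructor
      · intro h; exact absurd h (by simp)
      · intro h
        have h2 := h i le_rfl (le_of_lt hij)
        have h3 : i + j - i = j := by omega
        rw [h3] at h2
        exact absurd h2 hne
  | case2 i j hij hne ih =>
      rw [pvPalLoop, if_pos hij, if_neg hne]
      rw [not_not] at hne
      constructor
      · intro h k hk1 hk2
        rcases Nat.eq_or_lt_of_le hk1 with rfl | hk1'
        · have h3 : i + j - i = j := by omega
          rw [h3]; exact hne
        · rcases Nat.eq_or_lt_of_le hk2 with rfl | hk2'
          · have h3 : i + k - k = i := by omega
            rw [h3]; exact hne.symm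
          · have h4 := (ih.mp h) k (by omega) (by omega)
            have heq : i + 1 + (j - 1) = i + j := by omega
            rwa [heq] at h4
      · intro h
        apply ih.mpr
        intro k hk1 hk2
        have heq : i + 1 + (j - 1) = i + j := by omega
        rw [heq]
        exact h k (by omega) (by omega)
  | case3 i j hij =>
      rw [pvPalLoop, if_neg hij]
      constructor
      · intro _ k hk1 hk2
        have hk : k = i ∧ i = j := by omega
        rcases hk with ⟨rfl, rfl⟩
        congr 1; omega
      · intro _; rfl

-- mirror-pair condition over the whole list is exactly self-reversal
lemma reverse_eq_iff_pairs (cs : List Char) :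
    cs.reverse = cs ↔ ∀ k, k < cs.length → cs.getD k ' ' = cs.getD (cs.length - 1 - k) ' ' := by
  constructor
  · intro h k hk
    have hrk : k < cs.reverse.length := by simpa using hk
    calc cs.getD k ' ' = cs.reverse.getD k ' ' := by rw [h]
      _ = cs.reverse[k] := List.getD_eq_getElem _ ' ' hrk
      _ = cs[cs.length - 1 - k] := List.getElem_reverse hrk
      _ = cs.getD (cs.length - 1 - k) ' ' := (List.getD_eq_getElem _ ' ' (by omega)).symm
  · intro h
    apply List.ext_getElem (by simp)
    intro k hk1 hk2
    rw [List.getElem_reverse]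
    have h1 := h k hk2
    rw [List.getD_eq_getElem cs ' ' hk2, List.getD_eq_getElem cs ' ' (by omega)] at h1
    exact h1.symm

-- the body of B's per-word test equals the body of A's per-word test, on any cleaned list
lemma pvTest_eq (cs : List Char) :
    (if cs.isEmpty then false else pvPalLoop cs 0 (cs.length - 1)) = true ↔
      (cs = (PySem.List.slice? cs none none (-1)).getD [] ∧ cs ≠ []) := by
  rw [PySem.List.slice?_none_none_neg_one]
  simp only [Option.getD_some]
  by_cases hE : cs.isEmpty
  · rw [if_pos hE]
    simp only [List.isEmpty_iff] at hE
    simp [hE]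
  · rw [if_neg hE]
    simp only [List.isEmpty_iff] at hE
    have hlen : 0 < cs.length := List.length_pos_iff.mpr hE
    rw [pvPalLoop_true_iff]
    constructor
    · intro h
      refine ⟨?_, hE⟩
      symm
      rw [reverse_eq_iff_pairs]
      intro k hk
      by_cases hhalf : k ≤ cs.length - 1 - k
      · have h2 := h k (Nat.zero_le k) (by omega)
        simpa using h2
      · have h2 := h (cs.length - 1 - k) (Nat.zero_le _) (by omega)
        have heq : 0 + (cs.length - 1) - (cs.length - 1 - k) = k := by omega
        rw [heq] at h2
        simpa using h2.symm
    · rintro ⟨h, -⟩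
      intro k hk1 hk2
      have h2 := (reverse_eq_iff_pairs cs).mp h.symm k (by omega)
      simpa using h2

-- ===== VERDICT (by name: the statement is the Claim_ definition above) =====
theorem choose_palindromes_spec : Claim_equal_choose_palindromes := by
  intro words _
  show choose_palindromes words = choose_palindromes_alt words
  unfold choose_palindromes choose_palindromes_alt
  rw [PySem.List.foldl_append_ite_eq_filter]
  simp only [List.nil_append]
  apply List.filter_congr
  intro p _
  rw [decide_eq_decide.mpr (pvTest_eq ((PySem.Chars.lower p.toList).filter PySem.Chars.isalnum)).symm]
  rw [Bool.decide_eq_true]; rfl
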